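-- pv_equiv track=rewrite | github.com/backcrawler/tni_solutions | TNI4.py | make_paths
-- ===== SOURCE A (Python) =====
-- from itertools import permutations
-- from typing import List, Sequence, Tuple
--
-- def make_paths(seq: Sequence, obligatory: List) -> List[List]:
--     paths = [[]]
--     for i in range(1, len(seq)+1):
--         temp = [list(perm) for perm in permutations(seq, i)]
--         paths.extend(temp)
--     while obligatory:
--         try:
--             left = obligatory.pop(0)
--         except IndexError:
--             break
--         else:
--             for path in paths:
--                 path.insert(0, left)
--         try:
--             right = obligatory.pop()
--         except IndexError:
--             break
--         else:
--             for path in paths: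
--                 path.append(right)
--     return paths
-- ===== SOURCE B (Python) =====
-- def make_paths(seq, obligatory):
--     # closed-form wrapping: the reversed front half of obligatory becomes a prefix,
--     # the reversed back half a suffix, applied while emitting each base path
--     m = (len(obligatory) + 1) // 2
--     prefix = obligatory[:m][::-1]
--     suffix = obligatory[m:][::-1]
--     del obligatory[:]  # A drains obligatory in place; keep the same side effect
--     out = [prefix + suffix]
--     # one breadth-first expansion: each row is (chosen-so-far, remaining elements);
--     # after level i the rows' chosen parts are exactly the length-i permutations
--     rows = [((), tuple(seq))]
--     for _ in range(1, len(seq) + 1):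
--         rows = [(c + (rem[j],), rem[:j] + rem[j + 1:])
--                 for (c, rem) in rows for j in range(len(rem))]
--         out.extend(prefix + list(c) + suffix for c, _ in rows)
--     return out
-- ===== Notes on version B (the rewrite author's own statement) =====
-- stated objective: alternative
-- what changed: B replaces A's while-loop that repeatedly mutates every path (insert at front / append at back, once per obligatory element) by a closed-form slice computation of the reversed front half and reversed back half of obligatory followed by a single concatenation pass, and enumerates k-permutations by breadth-first row expansion over (chosen, remaining) pairs instead of itertools' depth-first recursion.
import Mathlib
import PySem

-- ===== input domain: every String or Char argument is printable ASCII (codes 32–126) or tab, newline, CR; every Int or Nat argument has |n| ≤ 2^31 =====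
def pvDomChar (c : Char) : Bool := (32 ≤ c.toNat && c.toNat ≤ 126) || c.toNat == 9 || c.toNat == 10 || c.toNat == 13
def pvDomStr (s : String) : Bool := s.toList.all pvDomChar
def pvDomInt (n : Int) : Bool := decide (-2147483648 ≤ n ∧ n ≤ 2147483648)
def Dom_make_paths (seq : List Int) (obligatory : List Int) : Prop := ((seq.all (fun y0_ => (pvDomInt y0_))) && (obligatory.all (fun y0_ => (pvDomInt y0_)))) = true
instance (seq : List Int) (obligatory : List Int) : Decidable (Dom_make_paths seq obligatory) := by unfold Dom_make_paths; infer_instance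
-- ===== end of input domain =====

-- B replaces A's while-loop of repeated in-place insert/append passes over every path by a
-- closed-form slice prefix/suffix wrapped around each base as it is emitted, and enumerates
-- permutations by one breadth-first row expansion instead of itertools' per-length depth-first
-- recursion (alternative). A drains `obligatory` in place; Source B performs the same mutation;
-- the theorem is about the return value.

-- ===== PORT A =====
-- picksA/permsA transliterate itertools.permutations(seq, i): depth-first selection by position.
def picksA : List Int → List (Int × List Int)
  | [] => []
  | x :: xs => (x, xs) :: (picksA xs).map (fun yp => (yp.1, x :: yp.2))

def permsA (seq : List Int) : Nat → List (List Int)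
  | 0 => [[]]
  | i+1 => (picksA seq).flatMap (fun yp => (permsA yp.2 i).map (fun p => yp.1 :: p))

-- the `while obligatory:` loop: pop front and prepend to every path, pop back and append, until empty
def loopA (paths : List (List Int)) (ob : List Int) : List (List Int) :=
  match ob with
  | [] => paths
  | o :: rest =>
    let paths1 := paths.map (fun p => o :: p)
    match rest with
    | [] => paths1
    | r :: rs =>
      loopA (paths1.map (fun p => p ++ [(r :: rs).getLast (by simp)])) (r :: rs).dropLast
  termination_by ob.length
  decreasing_by simp

def make_paths (seq : List Int) (obligatory : List Int) : List (List Int) :=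
  let paths := (PySem.List.pyRange 1 (seq.length+1) 1).foldl
      (fun paths i => paths ++ permsA seq i.toNat) [[]]
  loopA paths obligatory

-- ===== PORT B =====
-- the row comprehension of Source B: one breadth-first expansion level of (chosen, remaining) rows
def expandB (rows : List (List Int × List Int)) : List (List Int × List Int) :=
  rows.flatMap (fun cr =>
    (List.range cr.2.length).map (fun j =>
      (cr.1 ++ [cr.2.getD j 0], cr.2.take j ++ cr.2.drop (j+1))))

-- Source B's locals m/prefix/suffix/rows are written inline here (same values, same places)
def make_paths_alt (seq : List Int) (obligatory : List Int) : List (List Int) :=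
  ((PySem.List.pyRange 1 (seq.length+1) 1).foldl
      (fun st (_ : Int) =>
        (expandB st.1,
         st.2 ++ (expandB st.1).map (fun cr =>
           (obligatory.take ((obligatory.length + 1) / 2)).reverse ++ cr.1 ++
             (obligatory.drop ((obligatory.length + 1) / 2)).reverse)))
      ([([], seq)],
       [(obligatory.take ((obligatory.length + 1) / 2)).reverse ++
          (obligatory.drop ((obligatory.length + 1) / 2)).reverse])).2

-- ===== PRECONDITION & SPEC =====
def Spec_make_paths (seq : List Int) (obligatory : List Int) (out : List (List Int)) : Prop := out = make_paths_alt seq obligatory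
instance (seq : List Int) (obligatory : List Int) (out : List (List Int)) : Decidable (Spec_make_paths seq obligatory out) := by unfold Spec_make_paths; infer_instance

-- ===== CLAIM (what is proved, stated in full; the proofs are below) =====
def Claim_equal_make_paths : Prop := ∀ (seq : List Int) (obligatory : List Int), Dom_make_paths seq obligatory → Spec_make_paths seq obligatory (make_paths seq obligatory)

-- ===== LEMMAS AND PROOFS =====

-- B's index-based one-level expansion enumerates exactly A's positional picks
lemma picks_index_eq (rem : List Int) :
    (List.range rem.length).map (fun j => (rem.getD j 0, rem.take j ++ rem.drop (j+1)))
      = picksA rem := by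
  induction rem with
  | nil => simp [picksA]
  | cons x xs ih =>
    simp only [List.length_cons, List.range_succ_eq_map, List.map_cons, List.map_map]
    rw [picksA, ← ih, List.map_map]
    refine congrArg₂ List.cons (by simp) ?_
    apply List.map_congr_left
    intro j hj
    simp [Function.comp, Nat.succ_eq_add_one]

-- BFS invariant: i rounds of expansion reach every depth-first permutation of the remainder
lemma expand_iterate (i : Nat) : ∀ rows : List (List Int × List Int),
    (expandB^[i] rows).map Prod.fst
      = rows.flatMap (fun cr => (permsA cr.2 i).map (fun p => cr.1 ++ p)) := by
  induction i with
  | zero =>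
    intro rows
    induction rows with
    | nil => simp
    | cons r rs ih => simp_all [permsA]
  | succ i ih =>
    intro rows
    rw [Function.iterate_succ_apply, ih, expandB, List.flatMap_assoc]
    congr 1; funext cr
    have h : (List.range cr.2.length).map (fun j =>
          (cr.1 ++ [cr.2.getD j 0], cr.2.take j ++ cr.2.drop (j+1)))
        = (picksA cr.2).map (fun yp => (cr.1 ++ [yp.1], yp.2)) := by
      rw [← picks_index_eq]; simp [List.map_map, Function.comp]
    rw [h, List.flatMap_map]
    show _ = ((picksA cr.2).flatMap fun yp => (permsA yp.2 i).map (fun p => yp.1 :: p)).map _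
    rw [List.map_flatMap]
    congr 1; funext yp
    simp [Function.comp, List.map_map]

-- i expansion levels from the single seed row yield exactly the length-i permutations
lemma iterate_fst_eq (seq : List Int) (i : Nat) :
    (expandB^[i] [(([] : List Int), seq)]).map Prod.fst = permsA seq i := by
  simp [expand_iterate]

-- A's while-loop equals wrapping each path with the reversed front half and reversed back half
lemma loopA_eq : ∀ n (ob : List Int), ob.length = n → ∀ paths : List (List Int),
    loopA paths ob = paths.map (fun p =>
      (ob.take ((ob.length + 1) / 2)).reverse ++ p ++ (ob.drop ((ob.length + 1) / 2)).reverse) := by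
  intro n
  induction n using Nat.strong_induction_on with
  | _ n IH =>
    intro ob hlen paths
    match ob with
    | [] => simp [loopA]
    | [o] => simp [loopA]
    | o :: r :: rs =>
      obtain ⟨init, a, hra⟩ : ∃ init a, r :: rs = init ++ [a] :=
        ⟨(r :: rs).dropLast, (r :: rs).getLast (by simp),
          (List.dropLast_append_getLast (by simp)).symm⟩
      rw [loopA]
      simp only [hra, List.getLast_append_singleton, List.dropLast_concat, List.map_map]
      have hlt : init.length < n := by
        have h2 := congrArg List.length hra
        simp only [List.length_cons, List.length_append] at h2
        simp only [List.length_cons] at hlen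
        omega
      rw [IH init.length hlt init rfl]
      have hm : ((o :: (init ++ [a])).length + 1) / 2 = (init.length + 1) / 2 + 1 := by
        simp; omega
      have hle : (init.length + 1) / 2 ≤ init.length := by omega
      rw [List.map_map]
      apply List.map_congr_left
      intro p _
      simp only [Function.comp, hm, List.take_succ_cons, List.drop_succ_cons,
        List.take_append_of_le_length hle, List.drop_append_of_le_length hle,
        List.reverse_cons, List.reverse_append]
      simp

-- pushing a map through A's accumulating foldl
lemma map_foldl_append {α : Type} (g : List Int → List Int) (f : α → List (List Int)) :
    ∀ (l : List α) (a : List (List Int)),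
    (l.foldl (fun bs k => bs ++ f k) a).map g
      = l.foldl (fun bs k => bs ++ (f k).map g) (a.map g) := by
  intro l
  induction l with
  | nil => intro a; rfl
  | cons x xs ih => intro a; simp only [List.foldl_cons, ih, List.map_append]

-- an element-ignoring fold does not depend on the list's entries, only on its length
lemma foldl_map_ignore {α β σ : Type} (g : σ → σ) (f : α → β) :
    ∀ (l : List α) (a : σ),
    (l.map f).foldl (fun st _ => g st) a = l.foldl (fun st _ => g st) a := by
  intro l
  induction l with
  | nil => intro a; rfl
  | cons x xs ih => intro a; simp only [List.map_cons, List.foldl_cons, ih]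

-- B's state fold produces exactly A's wrapped per-length permutation blocks
lemma fold_state_eq (seq pre suf : List Int) :
    ∀ (c j : Nat) (acc : List (List Int)),
    (List.range c).foldl
        (fun st (_ : Nat) =>
          (expandB st.1, st.2 ++ (expandB st.1).map (fun cr => pre ++ cr.1 ++ suf)))
        (expandB^[j] [(([] : List Int), seq)], acc)
      = (expandB^[j+c] [(([] : List Int), seq)],
         (List.range c).foldl
           (fun bs k => bs ++ (permsA seq (j+k+1)).map (fun p => pre ++ p ++ suf)) acc) := by
  intro c
  induction c with
  | zero => intro j acc; rfl
  | succ c ih =>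
    intro j acc
    simp only [List.range_succ, List.foldl_append, List.foldl_cons, List.foldl_nil, ih]
    have hit : expandB (expandB^[j+c] [(([] : List Int), seq)])
        = expandB^[j+(c+1)] [(([] : List Int), seq)] := by
      rw [show j+(c+1) = (j+c)+1 from rfl]
      exact (Function.iterate_succ_apply' expandB (j+c) _).symm
    have hrows : (expandB^[j+(c+1)] [(([] : List Int), seq)]).map
          (fun cr => pre ++ cr.1 ++ suf)
        = (permsA seq (j+(c+1))).map (fun p => pre ++ p ++ suf) := by
      rw [← iterate_fst_eq seq (j+(c+1)), List.map_map]; rfl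
    simp only [hit, hrows]
    refine congrArg₂ Prod.mk rfl ?_
    rw [show j+(c+1) = j+c+1 from rfl]

-- ===== VERDICT (by name: the statement is the Claim_ definition above) =====
theorem make_paths_spec : Claim_equal_make_paths := by
  intro seq ob _
  show make_paths seq ob = make_paths_alt seq ob
  unfold make_paths make_paths_alt
  rw [loopA_eq ob.length ob rfl, map_foldl_append]
  have hn : (((seq.length : Int) + 1) - 1).toNat = seq.length := by omega
  rw [PySem.List.pyRange_one, hn, List.foldl_map, foldl_map_ignore]
  have h0 := fold_state_eq seq ((ob.take ((ob.length + 1) / 2)).reverse)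
      ((ob.drop ((ob.length + 1) / 2)).reverse) seq.length 0
      [(ob.take ((ob.length + 1) / 2)).reverse ++ (ob.drop ((ob.length + 1) / 2)).reverse]
  simp only [Function.iterate_zero_apply] at h0
  rw [h0]
  have hcast : ∀ k : Nat, ((1 : Int) + k).toNat = 0 + k + 1 := fun k => by omega
  simp only [hcast, List.map_cons, List.map_nil, List.append_nil]
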